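-- pv_equiv track=rewrite | github.com/ShiotaTakumi/RotationalUnfolding | scripts/isomorphic_remover.py | flip_sequence
-- ===== SOURCE A (Python) =====
-- def flip_sequence(seq):
--     flipped = []
--     n = len(seq)
--     for i in range(0, n, 2):
--         g = seq[i]
--         c = seq[i + 1]
--         flipped.append(g)
--         if i == 0:
--             flipped.append(0)
--         elif i == n - 2:
--             flipped.append(-1)
--         else:
--             flipped.append(g - c)
--     return flipped
-- ===== SOURCE B (Python) =====
-- def flip_sequence(seq):
--     gs = seq[0::2]
--     cs = seq[1::2]
--     marks = [g - c for g, c in zip(gs, cs)]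
--     if marks:
--         marks[0] = 0
--     if len(marks) > 1:
--         marks[-1] = -1
--     out = []
--     for g, m in zip(gs, marks):
--         out += [g, m]
--     return out
-- ===== Notes on version B (the rewrite author's own statement) =====
-- stated objective: alternative
-- what changed: B is staged and index-free: it extracts the even and odd subsequences with extended slices, builds the marker column as a zipped difference list, patches its two endpoints, and interleaves the columns with zip, instead of A's single stride-2 index loop with a three-way branch per iteration.
import Mathlib
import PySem

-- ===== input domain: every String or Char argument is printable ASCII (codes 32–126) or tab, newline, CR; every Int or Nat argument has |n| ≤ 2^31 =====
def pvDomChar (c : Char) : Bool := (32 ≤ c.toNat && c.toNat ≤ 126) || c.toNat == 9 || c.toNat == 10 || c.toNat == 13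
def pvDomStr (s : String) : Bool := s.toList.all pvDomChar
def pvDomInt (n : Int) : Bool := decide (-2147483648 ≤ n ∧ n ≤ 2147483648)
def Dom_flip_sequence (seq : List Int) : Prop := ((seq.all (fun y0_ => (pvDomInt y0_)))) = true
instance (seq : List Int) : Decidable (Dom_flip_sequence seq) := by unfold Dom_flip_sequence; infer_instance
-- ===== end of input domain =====

-- B is staged and index-free (slices into columns, a patched marker column, interleave by zip)
-- where A is a single stride-2 index loop with a per-iteration three-way branch; objective: alternative.

-- ===== PORT A =====
-- seq[i] / seq[i+1] are ported as pyGetD with default 0; under Pre_ (even length) every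
-- accessed index is in range, so the default is never used.
def flip_sequence (seq : List Int) : List Int :=
  let n : Int := seq.length
  (PySem.List.pyRange 0 n 2).foldl (fun flipped i =>
    let g := PySem.List.pyGetD seq i 0
    let c := PySem.List.pyGetD seq (i + 1) 0
    let flipped := flipped ++ [g]
    if i = 0 then flipped ++ [0]
    else if i = n - 2 then flipped ++ [-1]
    else flipped ++ [g - c]) []

-- ===== PORT B =====
def flip_sequence_alt (seq : List Int) : List Int :=
  let gs := (PySem.List.slice? seq (some 0) none 2).getD []   -- seq[0::2]; step 2 ≠ 0, never none
  let cs := (PySem.List.slice? seq (some 1) none 2).getD []   -- seq[1::2]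
  let marks := (gs.zip cs).map (fun p => p.1 - p.2)
  let marks := if marks ≠ [] then PySem.List.pySetD marks 0 0 else marks
  let marks := if 1 < marks.length then PySem.List.pySetD marks (-1) (-1) else marks
  (gs.zip marks).foldl (fun out p => out ++ [p.1, p.2]) []

-- ===== PRECONDITION & SPEC =====
-- Pre_ excludes odd-length inputs: there A raises IndexError on seq[i + 1].
def Pre_flip_sequence (seq : List Int) : Prop := seq.length % 2 = 0
instance (seq : List Int) : Decidable (Pre_flip_sequence seq) := by unfold Pre_flip_sequence; infer_instance
def pvWitness_flip_sequence : List Int := [5, 2, 7, 1, 4, 9]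
def Spec_flip_sequence (seq : List Int) (out : List Int) : Prop := out = flip_sequence_alt seq
instance (seq : List Int) (out : List Int) : Decidable (Spec_flip_sequence seq out) := by unfold Spec_flip_sequence; infer_instance

-- ===== CLAIM (what is proved, stated in full; the proofs are below) =====
def Claim_equal_flip_sequence : Prop := ∀ (seq : List Int), Dom_flip_sequence seq → Pre_flip_sequence seq → Spec_flip_sequence seq (flip_sequence seq)

-- ===== LEMMAS AND PROOFS =====

-- An extended slice xs[s::2] (s = 0 or 1) of an even-length list is the column of entries 2k+s.
theorem slice_step2 (xs : List Int) (m s : Nat) (hs : s ≤ 1) (h : xs.length = 2 * m) :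
    (PySem.List.slice? xs (some (s : Int)) none 2).getD []
      = (List.range m).map (fun k => xs.getD (2 * k + s) 0) := by
  rcases Nat.eq_zero_or_pos m with h0 | h0
  · subst h0
    have hx : xs = [] := List.length_eq_zero_iff.mp (by omega)
    subst hx
    interval_cases s <;> rfl
  · simp only [PySem.List.slice?, PySem.List.sliceIndices]
    have h2 : ¬ ((2 : Int) = 0) := by norm_num
    have hneg : ¬ ((2 : Int) < 0) := by norm_num
    simp only [h2, if_false, hneg]
    have hsnn : ¬ ((s : Int) < 0) := by omega
    simp only [hsnn, if_false]
    have hstart : min (s : Int) (xs.length : Int) = (s : Int) := by omega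
    rw [hstart]
    have hlt : (s : Int) < (xs.length : Int) := by omega
    have hpos : (0 : Int) < 2 := by norm_num
    simp only [hpos, if_true, hlt, if_true]
    have hcount : (((xs.length : Int) - (s : Int) + 2 - 1) / 2).toNat = m := by omega
    rw [hcount]
    refine (List.filterMap_congr (g := some ∘ fun k : Nat => xs.getD (2 * k + s) 0) ?_).trans
      (congrFun List.filterMap_eq_map _)
    intro k hk
    rw [List.mem_range] at hk
    have hidx : ((s : Int) + 2 * (k : Int)).toNat = 2 * k + s := by omega
    have hlt2 : 2 * k + s < xs.length := by omega
    simp [hidx, List.getElem?_eq_getElem hlt2]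

-- A as a flatMap over List.range m.
theorem flipA_eq_flatMap (seq : List Int) (m : Nat) (hm : seq.length = 2 * m) :
    flip_sequence seq
      = (List.range m).flatMap (fun k : Nat =>
          [seq.getD (2 * k) 0,
            if k = 0 then 0 else if k = m - 1 then (-1 : Int)
            else seq.getD (2 * k) 0 - seq.getD (2 * k + 1) 0]) := by
  have hM : (if (0 : Int) < (seq.length : Int)
      then (((seq.length : Int) - 0 + 2 - 1) / 2).toNat else 0) = m := by
    by_cases hpos : (0 : Int) < (seq.length : Int)
    · rw [if_pos hpos]; omega
    · rw [if_neg hpos]; omega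
  have hrange : PySem.List.pyRange 0 (seq.length : Int) 2
      = (List.range m).map (fun k : Nat => (0 : Int) + 2 * (k : Int)) := by
    rw [PySem.List.pyRange_of_pos 0 (seq.length : Int) (by norm_num), hM]
  show (PySem.List.pyRange 0 (seq.length : Int) 2).foldl _ [] = _
  have hcongr : (PySem.List.pyRange 0 (seq.length : Int) 2).foldl (fun flipped i =>
      let g := PySem.List.pyGetD seq i 0
      let c := PySem.List.pyGetD seq (i + 1) 0
      let flipped := flipped ++ [g]
      if i = 0 then flipped ++ [0]
      else if i = (seq.length : Int) - 2 then flipped ++ [-1]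
      else flipped ++ [g - c]) []
      = (PySem.List.pyRange 0 (seq.length : Int) 2).foldl (fun flipped i =>
          flipped ++ [PySem.List.pyGetD seq i 0,
            if i = 0 then 0 else if i = (seq.length : Int) - 2 then -1
            else PySem.List.pyGetD seq i 0 - PySem.List.pyGetD seq (i + 1) 0]) [] := by
    apply PySem.List.foldl_congr_mem
    intro acc x _
    by_cases h0 : x = 0
    · simp [h0]
    · by_cases h1 : x = (seq.length : Int) - 2
      · subst h1; simp [h0]
      · simp [h0, h1]
  rw [hcongr, PySem.List.foldl_append_eq_flatMap, List.nil_append, hrange, List.flatMap_map]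
  apply List.flatMap_congr
  intro k hk
  rw [List.mem_range] at hk
  have e0 : ((0 : Int) + 2 * (k : Int) = 0) ↔ (k = 0) := by omega
  have e1 : ((0 : Int) + 2 * (k : Int) = (seq.length : Int) - 2) ↔ (k = m - 1) := by omega
  have g1 : PySem.List.pyGetD seq ((0 : Int) + 2 * (k : Int)) 0 = seq.getD (2 * k) 0 := by
    have : (0 : Int) + 2 * (k : Int) = ((2 * k : Nat) : Int) := by push_cast; ring
    rw [this, PySem.List.pyGetD_natCast]
  have g2 : PySem.List.pyGetD seq ((0 : Int) + 2 * (k : Int) + 1) 0 = seq.getD (2 * k + 1) 0 := by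
    have : (0 : Int) + 2 * (k : Int) + 1 = ((2 * k + 1 : Nat) : Int) := by push_cast; ring
    rw [this, PySem.List.pyGetD_natCast]
  simp only [e0, e1, g1, g2]

-- Setting an entry of a map over range rewrites the function at that index.
theorem map_range_set (h : Nat → Int) (N j : Nat) (v : Int) :
    ((List.range N).map h).set j v
      = (List.range N).map (fun i => if i = j then v else h i) := by
  apply List.ext_getElem
  · simp
  · intro i h1 h2
    rw [List.getElem_set]
    simp only [List.getElem_map, List.getElem_range]
    by_cases hij : j = i
    · simp [hij]
    · simp [hij, Ne.symm hij]

-- pySetD with index -1 sets the last element.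
theorem pySetD_neg_one {α : Type} (xs : List α) (v : α) (hne : xs ≠ []) :
    PySem.List.pySetD xs (-1) v = xs.set (xs.length - 1) v := by
  have hlen : 0 < xs.length := List.length_pos_iff.mpr hne
  simp only [PySem.List.pySetD, PySem.List.pySet?, PySem.List.pyIdx?]
  have h1 : ¬ ((0 : Int) ≤ -1) := by omega
  have h2 : -((xs.length : Int)) ≤ -1 := by omega
  simp only [h1, if_false, h2, if_true]
  simp

theorem flip_sequence_eq_alt (seq : List Int) (hpre : seq.length % 2 = 0) :
    flip_sequence seq = flip_sequence_alt seq := by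
  obtain ⟨m, hm⟩ : ∃ m, seq.length = 2 * m := ⟨seq.length / 2, by omega⟩
  have hg : (PySem.List.slice? seq (some 0) none 2).getD []
      = (List.range m).map (fun k => seq.getD (2 * k) 0) := by
    have := slice_step2 seq m 0 (by omega) hm
    simpa using this
  have hc : (PySem.List.slice? seq (some 1) none 2).getD []
      = (List.range m).map (fun k => seq.getD (2 * k + 1) 0) := by
    have := slice_step2 seq m 1 (by omega) hm
    simpa using this
  rw [flipA_eq_flatMap seq m hm]
  unfold flip_sequence_alt
  simp only [hg, hc, List.zip_map', List.map_map]
  have hcomp : ((fun p : Int × Int => p.1 - p.2) ∘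
      fun k : Nat => (seq.getD (2 * k) 0, seq.getD (2 * k + 1) 0))
      = fun k : Nat => seq.getD (2 * k) 0 - seq.getD (2 * k + 1) 0 := rfl
  rw [hcomp]
  rcases Nat.eq_zero_or_pos m with h0 | h0
  · subst h0; simp
  · have hne : (List.range m).map
        (fun k => seq.getD (2 * k) 0 - seq.getD (2 * k + 1) 0) ≠ [] := by
      simp [List.map_eq_nil_iff, List.range_eq_nil]; omega
    rw [if_pos hne]
    have hset0 : ∀ xs : List Int, PySem.List.pySetD xs 0 0 = xs.set 0 0 := by
      intro xs
      have h00 : ((0 : Nat) : Int) = (0 : Int) := by norm_num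
      rw [← h00, PySem.List.pySetD_natCast]
    rw [hset0, map_range_set]
    rcases Nat.lt_or_ge 1 m with hm2 | hm1
    · -- m ≥ 2 : the last-element patch fires
      have hlen1 : ((List.range m).map (fun i => if i = 0 then (0 : Int)
          else seq.getD (2 * i) 0 - seq.getD (2 * i + 1) 0)).length = m := by simp
      have hgt : 1 < ((List.range m).map (fun i => if i = 0 then (0 : Int)
          else seq.getD (2 * i) 0 - seq.getD (2 * i + 1) 0)).length := by rw [hlen1]; exact hm2
      rw [if_pos hgt]
      have hne1 : (List.range m).map (fun i => if i = 0 then (0 : Int)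
          else seq.getD (2 * i) 0 - seq.getD (2 * i + 1) 0) ≠ [] := by
        intro h; rw [h] at hlen1; simp at hlen1; omega
      rw [pySetD_neg_one _ _ hne1, hlen1, map_range_set, List.zip_map',
        PySem.List.foldl_append_eq_flatMap (g := fun p : Int × Int => [p.1, p.2]),
        List.nil_append, List.flatMap_map]
      apply List.flatMap_congr
      intro k hk
      rw [List.mem_range] at hk
      by_cases hk0 : k = 0
      · subst hk0
        have hne0 : ¬ ((0 : Nat) = m - 1) := by omega
        simp [hne0]
      · by_cases hkl : k = m - 1
        · have hne0 : ¬ (m - 1 = 0) := by omega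
          simp [hkl, hne0]
        · simp [hk0, hkl]
    · -- m = 1 : single pair, no last-element patch
      have hm1' : m = 1 := by omega
      subst hm1'
      simp [List.range_one]

-- ===== VERDICT (by name: the statement is the Claim_ definition above) =====
theorem flip_sequence_spec : Claim_equal_flip_sequence := by
  intro seq _ hpre
  exact flip_sequence_eq_alt seq hpre
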